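-- pv_equiv track=rewrite | github.com/Gagan234/gridfm-graphkit | tests/test_topology_masking.py | _is_connected_subgraph
-- ===== SOURCE A (Python) =====
-- def _is_connected_subgraph(
--     nodes: set, edge_pairs: set, anchor: int,
-- ) -> bool:
--     """Verify every node in `nodes` is reachable from `anchor` along edges
--     whose endpoints both lie in `nodes`."""
--     if anchor not in nodes:
--         return False
--     seen = {anchor}
--     frontier = {anchor}
--     while frontier:
--         next_frontier = set()
--         for u in frontier:
--             for v in nodes:
--                 if v == u or v in seen:
--                     continue
--                 if (u, v) in edge_pairs or (v, u) in edge_pairs: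
--                     next_frontier.add(v)
--         seen |= next_frontier
--         frontier = next_frontier
--     return seen == nodes
-- ===== SOURCE B (Python) =====
-- def _is_connected_subgraph(
--     nodes: set, edge_pairs: set, anchor: int,
-- ) -> bool:
--     """Verify every node in `nodes` is reachable from `anchor` along edges
--     whose endpoints both lie in `nodes` -- via an adjacency map and neighbour-list BFS."""
--     if anchor not in nodes:
--         return False
--     adj = {}
--     for a, b in edge_pairs:
--         if a != b and a in nodes and b in nodes:
--             adj.setdefault(a, set()).add(b)
--             adj.setdefault(b, set()).add(a)
--     seen = {anchor}
--     frontier = {anchor}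
--     while frontier:
--         next_frontier = set()
--         for u in frontier:
--             for v in adj.get(u, ()):
--                 if v not in seen:
--                     next_frontier.add(v)
--         seen |= next_frontier
--         frontier = next_frontier
--     return len(seen) == len(nodes)
-- ===== Notes on version B (the rewrite author's own statement) =====
-- stated objective: alternative
-- what changed: B builds an adjacency map from the edges once and BFS-expands each frontier over recorded neighbours only, comparing set sizes at the end, instead of A's per-layer rescan of every node against every frontier node with set-equality at the end.
import Mathlib
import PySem

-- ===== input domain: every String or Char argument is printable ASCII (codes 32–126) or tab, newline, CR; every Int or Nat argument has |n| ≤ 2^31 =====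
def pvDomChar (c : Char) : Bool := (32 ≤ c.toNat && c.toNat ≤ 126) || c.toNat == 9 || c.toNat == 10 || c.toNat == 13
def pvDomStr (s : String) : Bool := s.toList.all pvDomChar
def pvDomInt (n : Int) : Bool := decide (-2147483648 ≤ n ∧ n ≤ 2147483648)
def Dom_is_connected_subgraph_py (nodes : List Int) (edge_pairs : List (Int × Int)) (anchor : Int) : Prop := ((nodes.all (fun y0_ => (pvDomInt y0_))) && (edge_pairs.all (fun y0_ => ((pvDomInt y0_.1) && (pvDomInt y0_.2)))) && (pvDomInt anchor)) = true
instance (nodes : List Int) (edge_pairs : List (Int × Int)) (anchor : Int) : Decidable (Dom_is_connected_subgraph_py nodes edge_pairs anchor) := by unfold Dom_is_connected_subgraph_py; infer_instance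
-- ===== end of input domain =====

-- B replaces A's per-layer scan of ALL nodes against the edge set by a BFS over an
-- adjacency map built once from the edges, comparing sizes at the end (objective: alternative).
-- Python set arguments arrive as duplicate-free lists (PySem.Set); every iteration over a
-- set here only builds another set or takes sizes, so set hash order cannot affect results.

-- ===== PORT A =====
-- next_frontier of one while-iteration of A: for u in frontier, for v in nodes, …
def pvNextA (N : PySem.Set Int) (E : PySem.Set (Int × Int)) (seen frontier : PySem.Set Int) : PySem.Set Int :=
  frontier.foldl (fun nf u =>
    N.foldl (fun nf v =>
      if v == u || PySem.Set.contains seen v then nf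
      else if PySem.Set.contains E (u, v) || PySem.Set.contains E (v, u) then PySem.Set.add nf v
      else nf) nf) PySem.Set.empty

-- A's while-loop; fuel = |nodes| always outlasts the layers (every iteration taken with a
-- nonempty frontier strictly enlarged `seen ⊆ nodes` on the step before), so the port
-- returns exactly the `seen` the Python loop ends with.
def pvLoopA (N : PySem.Set Int) (E : PySem.Set (Int × Int)) : Nat → PySem.Set Int → PySem.Set Int → PySem.Set Int
  | 0, seen, _ => seen
  | fuel + 1, seen, frontier =>
    if frontier.isEmpty then seen
    else
      let nf := pvNextA N E seen frontier
      pvLoopA N E fuel (PySem.Set.update seen nf) nf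

def is_connected_subgraph_py (nodes : List Int) (edge_pairs : List (Int × Int)) (anchor : Int) : Bool :=
  let N : PySem.Set Int := PySem.Set.ofList nodes
  let E : PySem.Set (Int × Int) := PySem.Set.ofList edge_pairs
  if !(PySem.Set.contains N anchor) then false
  else PySem.Set.equal (pvLoopA N E N.length [anchor] [anchor]) N

-- ===== PORT B =====
-- adjacency map: for (a, b) in edge_pairs with a ≠ b and both endpoints in nodes,
-- record each endpoint in the other's neighbour set
def pvAdjB (N : PySem.Set Int) (E : PySem.Set (Int × Int)) : PySem.Dict Int (PySem.Set Int) :=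
  E.foldl (fun d p =>
    if p.1 != p.2 && PySem.Set.contains N p.1 && PySem.Set.contains N p.2 then
      (d.modify p.1 [] (fun s => PySem.Set.add s p.2)).modify p.2 [] (fun s => PySem.Set.add s p.1)
    else d) PySem.Dict.empty

-- next_frontier of one while-iteration of B: only u's recorded neighbours are scanned
def pvNextB (adj : PySem.Dict Int (PySem.Set Int)) (seen frontier : PySem.Set Int) : PySem.Set Int :=
  frontier.foldl (fun nf u =>
    (adj.getD u []).foldl (fun nf v =>
      if PySem.Set.contains seen v then nf else PySem.Set.add nf v) nf) PySem.Set.empty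

def pvLoopB (adj : PySem.Dict Int (PySem.Set Int)) : Nat → PySem.Set Int → PySem.Set Int → PySem.Set Int
  | 0, seen, _ => seen
  | fuel + 1, seen, frontier =>
    if frontier.isEmpty then seen
    else
      let nf := pvNextB adj seen frontier
      pvLoopB adj fuel (PySem.Set.update seen nf) nf

def is_connected_subgraph_py_alt (nodes : List Int) (edge_pairs : List (Int × Int)) (anchor : Int) : Bool :=
  let N : PySem.Set Int := PySem.Set.ofList nodes
  if !(PySem.Set.contains N anchor) then false
  else
    let adj := pvAdjB N (PySem.Set.ofList edge_pairs)
    (pvLoopB adj N.length [anchor] [anchor]).length == N.length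

-- ===== PRECONDITION & SPEC =====
def Spec_is_connected_subgraph_py (nodes : List Int) (edge_pairs : List (Int × Int)) (anchor : Int) (out : Bool) : Prop := out = is_connected_subgraph_py_alt nodes edge_pairs anchor
instance (nodes : List Int) (edge_pairs : List (Int × Int)) (anchor : Int) (out : Bool) : Decidable (Spec_is_connected_subgraph_py nodes edge_pairs anchor out) := by unfold Spec_is_connected_subgraph_py; infer_instance

-- ===== CLAIM (what is proved, stated in full; the proofs are below) =====
def Claim_equal_is_connected_subgraph_py : Prop := ∀ (nodes : List Int) (edge_pairs : List (Int × Int)) (anchor : Int), Dom_is_connected_subgraph_py nodes edge_pairs anchor → Spec_is_connected_subgraph_py nodes edge_pairs anchor (is_connected_subgraph_py nodes edge_pairs anchor)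

-- ===== LEMMAS AND PROOFS =====
set_option maxHeartbeats 1000000

-- membership in A's next_frontier
lemma mem_pvNextA (N : PySem.Set Int) (E : PySem.Set (Int × Int)) (seen frontier : PySem.Set Int) (v : Int) :
    v ∈ pvNextA N E seen frontier ↔
      ∃ u ∈ frontier, v ∈ N ∧ v ≠ u ∧ v ∉ seen ∧ ((u, v) ∈ E ∨ (v, u) ∈ E) := by
  have inner : ∀ (u : Int) (l : List Int) (nf0 : PySem.Set Int),
      v ∈ l.foldl (fun nf w =>
        if w == u || PySem.Set.contains seen w then nf
        else if PySem.Set.contains E (u, w) || PySem.Set.contains E (w, u) then PySem.Set.add nf w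
        else nf) nf0 ↔
      v ∈ nf0 ∨ (v ∈ l ∧ v ≠ u ∧ v ∉ seen ∧ ((u, v) ∈ E ∨ (v, u) ∈ E)) := by
    intro u l
    induction l with
    | nil => simp
    | cons a l ih =>
      intro nf0
      simp only [List.foldl_cons, ih]
      by_cases h1 : a = u <;> by_cases h2 : a ∈ seen <;>
        by_cases h3 : (u, a) ∈ E ∨ (a, u) ∈ E <;>
        simp [h1, h2, h3, PySem.Set.mem_add, List.mem_cons] <;> aesop
  have outer : ∀ (fr : List Int) (nf0 : PySem.Set Int),
      v ∈ fr.foldl (fun nf u =>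
        N.foldl (fun nf w =>
          if w == u || PySem.Set.contains seen w then nf
          else if PySem.Set.contains E (u, w) || PySem.Set.contains E (w, u) then PySem.Set.add nf w
          else nf) nf) nf0 ↔
      v ∈ nf0 ∨ ∃ u ∈ fr, v ∈ N ∧ v ≠ u ∧ v ∉ seen ∧ ((u, v) ∈ E ∨ (v, u) ∈ E) := by
    intro fr
    induction fr with
    | nil => simp
    | cons a fr ih =>
      intro nf0
      simp only [List.foldl_cons, ih, inner, List.exists_mem_cons_iff]
      rw [or_assoc]
  simpa [pvNextA] using outer frontier PySem.Set.empty

-- membership in B's adjacency map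
lemma mem_pvAdjB (N : PySem.Set Int) (E : PySem.Set (Int × Int)) (u v : Int) :
    v ∈ (pvAdjB N E).getD u [] ↔
      u ≠ v ∧ u ∈ N ∧ v ∈ N ∧ ((u, v) ∈ E ∨ (v, u) ∈ E) := by
  have gen : ∀ (l : List (Int × Int)) (d : PySem.Dict Int (PySem.Set Int)),
      v ∈ (l.foldl (fun d p =>
        if p.1 != p.2 && PySem.Set.contains N p.1 && PySem.Set.contains N p.2 then
          (d.modify p.1 [] (fun s => PySem.Set.add s p.2)).modify p.2 [] (fun s => PySem.Set.add s p.1)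
        else d) d).getD u [] ↔
      v ∈ d.getD u [] ∨ ∃ p ∈ l, p.1 ≠ p.2 ∧ p.1 ∈ N ∧ p.2 ∈ N ∧ ((u, v) = p ∨ (v, u) = p) := by
    intro l
    induction l with
    | nil => simp
    | cons q l ih =>
      intro d
      obtain ⟨q1, q2⟩ := q
      simp only [List.foldl_cons, ih, List.exists_mem_cons_iff]
      by_cases hc : q1 ≠ q2 ∧ q1 ∈ N ∧ q2 ∈ N
      · obtain ⟨h1, h2, h3⟩ := hc
        rw [if_pos (show ((q1, q2).1 != (q1, q2).2 && PySem.Set.contains N (q1, q2).1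
              && PySem.Set.contains N (q1, q2).2) = true by
            simp only [Bool.and_eq_true, bne_iff_ne, PySem.Set.contains_iff]
            exact ⟨⟨h1, h2⟩, h3⟩)]
        simp only [PySem.Dict.getD_modify, if_neg (Ne.symm h1)]
        by_cases hu2 : u = q2
        · subst hu2
          simp only [Prod.mk.injEq]
          aesop
        · by_cases hu1 : u = q1
          · subst hu1
            simp only [if_neg hu2, Prod.mk.injEq]
            aesop
          · simp only [if_neg hu2, if_neg hu1, Prod.mk.injEq]
            aesop
      · rw [if_neg (show ¬((q1, q2).1 != (q1, q2).2 && PySem.Set.contains N (q1, q2).1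
              && PySem.Set.contains N (q1, q2).2) = true by
            simp only [Bool.and_eq_true, bne_iff_ne, PySem.Set.contains_iff]
            tauto)]
        simp only [Prod.mk.injEq]
        constructor
        · rintro (h | h)
          · exact Or.inl h
          · exact Or.inr (Or.inr h)
        · rintro (h | ⟨hne, hq1, hq2, _⟩ | h)
          · exact Or.inl h
          · exact absurd ⟨hne, hq1, hq2⟩ hc
          · exact Or.inr h
  have := gen E PySem.Dict.empty
  simp only [pvAdjB, this, PySem.Dict.getD_empty]
  constructor
  · rintro (h | ⟨p, hp, h1, h2, h3, (rfl | rfl)⟩)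
    · simp at h
    · exact ⟨h1, h2, h3, Or.inl hp⟩
    · exact ⟨Ne.symm h1, h3, h2, Or.inr hp⟩
  · rintro ⟨hne, hu, hv, (h | h)⟩
    · exact Or.inr ⟨(u, v), h, hne, hu, hv, Or.inl rfl⟩
    · exact Or.inr ⟨(v, u), h, Ne.symm hne, hv, hu, Or.inr rfl⟩

-- membership in B's next_frontier
lemma mem_pvNextB (adj : PySem.Dict Int (PySem.Set Int)) (seen frontier : PySem.Set Int) (v : Int) :
    v ∈ pvNextB adj seen frontier ↔ ∃ u ∈ frontier, v ∈ adj.getD u [] ∧ v ∉ seen := by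
  have inner : ∀ (l : List Int) (nf0 : PySem.Set Int),
      v ∈ l.foldl (fun nf w =>
        if PySem.Set.contains seen w then nf else PySem.Set.add nf w) nf0 ↔
      v ∈ nf0 ∨ (v ∈ l ∧ v ∉ seen) := by
    intro l
    induction l with
    | nil => simp
    | cons a l ih =>
      intro nf0
      simp only [List.foldl_cons, ih]
      by_cases h : a ∈ seen <;>
        simp [h, PySem.Set.mem_add, List.mem_cons] <;> aesop
  have outer : ∀ (fr : List Int) (nf0 : PySem.Set Int),
      v ∈ fr.foldl (fun nf u =>
        (adj.getD u []).foldl (fun nf w =>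
          if PySem.Set.contains seen w then nf else PySem.Set.add nf w) nf) nf0 ↔
      v ∈ nf0 ∨ ∃ u ∈ fr, v ∈ adj.getD u [] ∧ v ∉ seen := by
    intro fr
    induction fr with
    | nil => simp
    | cons a fr ih =>
      intro nf0
      simp only [List.foldl_cons, ih, inner, List.exists_mem_cons_iff]
      rw [or_assoc]
  simpa [pvNextB] using outer frontier PySem.Set.empty

-- the two loops bisimulate on extensionally equal states
lemma loop_bisim (N : PySem.Set Int) (E : PySem.Set (Int × Int)) :
    ∀ (fuel : Nat) (seenA seenB frA frB : PySem.Set Int),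
      (∀ x, x ∈ seenA ↔ x ∈ seenB) → (∀ x, x ∈ frA ↔ x ∈ frB) →
      (∀ x ∈ frA, x ∈ N) → (∀ x ∈ seenA, x ∈ N) → seenB.Nodup →
      (∀ x, x ∈ pvLoopA N E fuel seenA frA ↔ x ∈ pvLoopB (pvAdjB N E) fuel seenB frB)
      ∧ (∀ x ∈ pvLoopA N E fuel seenA frA, x ∈ N)
      ∧ (pvLoopB (pvAdjB N E) fuel seenB frB).Nodup := by
  intro fuel
  induction fuel with
  | zero =>
    intro seenA seenB frA frB hseen _ _ hseenN hnd
    exact ⟨hseen, hseenN, hnd⟩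
  | succ fuel ih =>
    intro seenA seenB frA frB hseen hfr hfrN hseenN hnd
    have hemp : frA.isEmpty = frB.isEmpty := by
      rcases frA with _ | ⟨a, frA⟩ <;> rcases frB with _ | ⟨b, frB⟩
      · rfl
      · exact absurd ((hfr b).mpr (List.mem_cons_self)) (List.not_mem_nil)
      · exact absurd ((hfr a).mp (List.mem_cons_self)) (List.not_mem_nil)
      · rfl
    simp only [pvLoopA, pvLoopB]
    by_cases he : frA.isEmpty = true
    · rw [if_pos he, if_pos (hemp ▸ he)]
      exact ⟨hseen, hseenN, hnd⟩
    · rw [if_neg he, if_neg (hemp ▸ he)]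
      have hnf : ∀ x, x ∈ pvNextA N E seenA frA ↔ x ∈ pvNextB (pvAdjB N E) seenB frB := by
        intro x
        rw [mem_pvNextA, mem_pvNextB]
        constructor
        · rintro ⟨u, hu, hxN, hxu, hxseen, hedge⟩
          exact ⟨u, (hfr u).mp hu,
            (mem_pvAdjB N E u x).mpr ⟨Ne.symm hxu, hfrN u hu, hxN, hedge⟩,
            fun h => hxseen ((hseen x).mpr h)⟩
        · rintro ⟨u, hu, hadj, hxseen⟩
          obtain ⟨hune, huN, hxN, hedge⟩ := (mem_pvAdjB N E u x).mp hadj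
          exact ⟨u, (hfr u).mpr hu, hxN, Ne.symm hune,
            fun h => hxseen ((hseen x).mp h), hedge⟩
      have hnfN : ∀ x ∈ pvNextA N E seenA frA, x ∈ N := by
        intro x hx
        obtain ⟨u, _, hxN, _⟩ := (mem_pvNextA N E seenA frA x).mp hx
        exact hxN
      apply ih
      · intro x
        rw [PySem.Set.mem_update, PySem.Set.mem_update]
        exact or_congr (hseen x) (hnf x)
      · exact hnf
      · exact hnfN
      · intro x hx
        rcases (PySem.Set.mem_update _ _ _).mp hx with h | h
        · exact hseenN x h
        · exact hnfN x h
      · exact PySem.Set.nodup_update _ _ hnd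

-- ===== VERDICT (by name: the statement is the Claim_ definition above) =====
theorem is_connected_subgraph_py_spec : Claim_equal_is_connected_subgraph_py := by
  intro nodes edge_pairs anchor _
  unfold Spec_is_connected_subgraph_py is_connected_subgraph_py is_connected_subgraph_py_alt
  by_cases hA : PySem.Set.contains (PySem.Set.ofList nodes) anchor = true
  · simp only [hA, Bool.not_true, Bool.false_eq_true, if_false]
    have hanchN : anchor ∈ PySem.Set.ofList nodes := by rwa [PySem.Set.contains_iff] at hA
    have hone : ∀ x ∈ ([anchor] : List Int), x ∈ PySem.Set.ofList nodes := by
      intro x hx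
      rw [List.mem_singleton] at hx
      exact hx ▸ hanchN
    obtain ⟨hmem, hsub, hnd⟩ := loop_bisim (PySem.Set.ofList nodes) (PySem.Set.ofList edge_pairs)
      (PySem.Set.ofList nodes).length [anchor] [anchor] [anchor] [anchor]
      (fun _ => Iff.rfl) (fun _ => Iff.rfl) hone hone (List.nodup_singleton _)
    set sA := pvLoopA (PySem.Set.ofList nodes) (PySem.Set.ofList edge_pairs)
      (PySem.Set.ofList nodes).length [anchor] [anchor] with hsA
    set sB := pvLoopB (pvAdjB (PySem.Set.ofList nodes) (PySem.Set.ofList edge_pairs))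
      (PySem.Set.ofList nodes).length [anchor] [anchor] with hsB
    have hndN : (PySem.Set.ofList nodes).Nodup := PySem.Set.nodup_ofList nodes
    have hsubB : sB ⊆ PySem.Set.ofList nodes := fun {x} hx => hsub x ((hmem x).mpr hx)
    rw [Bool.eq_iff_iff, PySem.Set.equal_iff, beq_iff_eq]
    constructor
    · intro h
      have hmemB : ∀ x, x ∈ sB ↔ x ∈ PySem.Set.ofList nodes :=
        fun x => (hmem x).symm.trans (h x)
      exact ((List.perm_ext_iff_of_nodup hnd hndN).mpr hmemB).length_eq
    · intro hlen
      have hperm : sB.Perm (PySem.Set.ofList nodes) :=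
        (List.subperm_of_subset hnd hsubB).perm_of_length_le (le_of_eq hlen.symm)
      intro x
      rw [hmem x]
      exact hperm.mem_iff
  · have hA' : anchor ∉ nodes := fun h =>
      hA (by rw [PySem.Set.contains_iff, PySem.Set.mem_ofList]; exact h)
    simp [hA']
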